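-- pv_equiv track=rewrite | github.com/iamtintin/projecteuler | Problem46.py | createOddCompositeList
-- ===== SOURCE A (Python) =====
-- def isOddComposite(n):
--     if n <= 3:
--         return False
--
--     if n % 2 == 0:
--         return False
--     if n % 3 == 0:
--         return True
--
--     i = 5
--     while (i ** 2) <= n:
--         if n % i == 0 or n % (i+2) == 0:
--             return True
--         i += 6
--     return False
--
-- def createOddCompositeList(n):
--     oddComposites = []
--     counter = 2
--     while len(oddComposites) < n:
--         num = (counter * 2) + 1
--         if isOddComposite(num):
--             oddComposites.append(num)
--         counter += 1
--     return oddComposites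
-- ===== SOURCE B (Python) =====
-- def createOddCompositeList(n):
--     # Generate the odd composites directly as products of odd factors: for each
--     # odd a >= 3, the products a*b (b odd, b >= a) form the arithmetic
--     # progression a*a, a*a + 2*a, ... ; collect them up to a provably
--     # sufficient bound (the n-th odd composite never exceeds 6*n + 3),
--     # then sort and keep the first n.
--     if n <= 0:
--         return []
--     limit = 6 * n + 3
--     comps = set()
--     for a in range(3, limit // 3 + 1, 2):
--         comps.update(range(a * a, limit + 1, 2 * a))
--     return sorted(comps)[:n]
-- ===== Notes on version B (the rewrite author's own statement) =====
-- stated objective: alternative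
-- what changed: Instead of scanning odd candidates and testing each one for compositeness by 6k±1 trial division, B generates every odd composite up to a provably sufficient bound (the n-th odd composite never exceeds 6n+3) directly, as the union of the arithmetic progressions {a*a, a*a+2a, ...} of products of odd factors a >= 3, then sorts the collected set and keeps the first n.
import Mathlib
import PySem

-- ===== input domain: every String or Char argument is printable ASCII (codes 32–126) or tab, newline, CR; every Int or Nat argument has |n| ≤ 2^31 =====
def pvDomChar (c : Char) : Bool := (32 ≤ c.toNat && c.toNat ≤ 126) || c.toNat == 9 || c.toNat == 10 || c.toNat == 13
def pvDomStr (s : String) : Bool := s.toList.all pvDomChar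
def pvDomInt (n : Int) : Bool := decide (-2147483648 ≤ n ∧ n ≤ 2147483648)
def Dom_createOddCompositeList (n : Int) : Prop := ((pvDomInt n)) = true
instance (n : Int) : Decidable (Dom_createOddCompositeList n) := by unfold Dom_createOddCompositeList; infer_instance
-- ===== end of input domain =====

-- B generates odd composites as products of odd factors up to a proven bound and sorts,
-- instead of A's per-candidate 6k±1 trial division; alternative algorithm, same results.


-- ===== PORT A =====
-- the 'while (i ** 2) <= n' loop of isOddComposite, with a sufficient fuel
-- (the loop stops once i*i > m, so m+1 iterations always cover it)
def pvWheel : Nat → Int → Int → Bool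
  | 0, _, _ => false
  | fuel + 1, m, i =>
    if i * i ≤ m then
      if PySem.Int.mod m i == 0 || PySem.Int.mod m (i + 2) == 0 then true
      else pvWheel fuel m (i + 6)
    else false

def pvIsOddComposite (m : Int) : Bool :=
  if m ≤ 3 then false
  else if PySem.Int.mod m 2 == 0 then false
  else if PySem.Int.mod m 3 == 0 then true
  else pvWheel (m.toNat + 1) m 5

-- the unbounded 'while len(oddComposites) < n' loop, with a sufficient fuel
-- (the n-th odd composite is at most 6n+3, reached at counter 3n+1)
def pvLoopA (n : Int) : Nat → List Int → Int → List Int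
  | 0, acc, _ => acc
  | fuel + 1, acc, counter =>
    if (acc.length : Int) < n then
      let num := counter * 2 + 1
      pvLoopA n fuel (if pvIsOddComposite num then acc ++ [num] else acc) (counter + 1)
    else acc

def createOddCompositeList (n : Int) : List Int :=
  pvLoopA n (3 * n.toNat + 5) [] 2

-- ===== PORT B =====
def createOddCompositeList_alt (n : Int) : List Int :=
  if n ≤ 0 then []
  else
    let limit := 6 * n + 3
    let comps : PySem.Set Int :=
      (PySem.List.pyRange 3 (PySem.Int.floordiv limit 3 + 1) 2).foldl
        (fun s a => PySem.Set.update s (PySem.List.pyRange (a * a) (limit + 1) (2 * a)))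
        PySem.Set.empty
    (PySem.List.sorted comps (fun x => x)).take n.toNat

-- ===== PRECONDITION & SPEC =====
def Spec_createOddCompositeList (n : Int) (out : List Int) : Prop := out = createOddCompositeList_alt n
instance (n : Int) (out : List Int) : Decidable (Spec_createOddCompositeList n out) := by unfold Spec_createOddCompositeList; infer_instance

-- ===== CLAIM (what is proved, stated in full; the proofs are below) =====
def Claim_equal_createOddCompositeList : Prop := ∀ (n : Int), Dom_createOddCompositeList n → Spec_createOddCompositeList n (createOddCompositeList n)

-- ===== LEMMAS AND PROOFS =====

-- 'm is an odd composite': a product of two odd factors both ≥ 3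
def pvIsOC (m : Int) : Prop := ∃ a b : Int, 3 ≤ a ∧ a ≤ b ∧ a % 2 = 1 ∧ b % 2 = 1 ∧ m = a * b

lemma pvIsOC_odd_ge (m : Int) (h : pvIsOC m) : m % 2 = 1 ∧ 9 ≤ m := by
  obtain ⟨a, b, h3, hab, ha2, hb2, hm⟩ := h
  constructor
  · subst hm; rw [Int.mul_emod, ha2, hb2]; decide
  · subst hm; nlinarith

lemma pvWheel_sound (fuel : Nat) (m : Int) : ∀ i : Int,
    5 ≤ i → pvWheel fuel m i = true → ∃ d : Int, d ∣ m ∧ 3 ≤ d ∧ d < m := by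
  induction fuel with
  | zero => intro i _ h; simp [pvWheel] at h
  | succ fuel ih =>
      intro i h5 h
      rw [pvWheel] at h
      by_cases hg : i * i ≤ m
      · rw [if_pos hg] at h
        by_cases ht : (PySem.Int.mod m i == 0 || PySem.Int.mod m (i + 2) == 0) = true
        · simp only [Bool.or_eq_true, beq_iff_eq] at ht
          rcases ht with ht | ht
          · exact ⟨i, (PySem.Int.mod_eq_zero_iff_dvd m i).mp ht, by omega, by nlinarith⟩
          · exact ⟨i + 2, (PySem.Int.mod_eq_zero_iff_dvd m (i + 2)).mp ht, by omega,
              by nlinarith⟩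
        · rw [if_neg ht] at h
          exact ih (i + 6) (by omega) h
      · rw [if_neg hg] at h
        exact absurd h (by simp)

lemma pvWheel_complete (m d : Int) (hd : d ∣ m)
    (hdd : d * d ≤ m) (hd6 : d % 6 = 1 ∨ d % 6 = 5) : ∀ (fuel : Nat) (i : Int),
    5 ≤ i → i % 6 = 5 → i ≤ d → d < i + 6 * fuel → pvWheel fuel m i = true := by
  intro fuel
  induction fuel with
  | zero => intro i _ _ h1 h2; push_cast at h2; omega
  | succ fuel ih =>
      intro i h5 h6 hxd hfd
      rw [pvWheel]
      rw [if_pos (le_trans (mul_self_le_mul_self (by omega) hxd) hdd)]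
      by_cases ht : (PySem.Int.mod m i == 0 || PySem.Int.mod m (i + 2) == 0) = true
      · rw [if_pos ht]
      · rw [if_neg ht]
        have hdx : d ≠ i := by
          intro hdx
          exact ht (by simp [beq_iff_eq,
            (PySem.Int.mod_eq_zero_iff_dvd m i).mpr (hdx ▸ hd)])
        have hdx2 : d ≠ i + 2 := by
          intro hdx2
          exact ht (by simp [beq_iff_eq,
            (PySem.Int.mod_eq_zero_iff_dvd m (i + 2)).mpr (hdx2 ▸ hd)])
        exact ih (i + 6) (by omega) (by omega) (by omega) (by push_cast at hfd ⊢; omega)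

lemma pvIsOddComposite_iff (m : Int) : pvIsOddComposite m = true ↔ pvIsOC m := by
  have hm2 : PySem.Int.mod m 2 = m % 2 := PySem.Int.mod_eq_emod_of_pos (by norm_num)
  have hm3 : PySem.Int.mod m 3 = m % 3 := PySem.Int.mod_eq_emod_of_pos (by norm_num)
  unfold pvIsOddComposite
  split_ifs with h1 h2 h3
  · simp only [Bool.false_eq_true, false_iff]
    intro hOC
    have := (pvIsOC_odd_ge m hOC).2
    omega
  · simp only [Bool.false_eq_true, false_iff]
    rw [beq_iff_eq, hm2] at h2
    intro hOC
    have := (pvIsOC_odd_ge m hOC).1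
    omega
  · simp only [true_iff]
    rw [beq_iff_eq, hm2] at h2
    rw [beq_iff_eq, hm3] at h3
    obtain ⟨b, hb⟩ : (3 : Int) ∣ m := by
      have := Int.emod_emod_of_dvd m (by norm_num : (3:Int) ∣ 3)
      exact Int.dvd_of_emod_eq_zero h3
    exact ⟨3, b, by norm_num, by omega, by norm_num, by omega, hb⟩
  · rw [beq_iff_eq, hm2] at h2
    rw [beq_iff_eq, hm3] at h3
    have hm5 : 5 ≤ m := by omega
    constructor
    · intro h
      obtain ⟨d, hdvd, hd3, hdm⟩ := pvWheel_sound (m.toNat + 1) m 5 (by norm_num) h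
      obtain ⟨e, he⟩ := hdvd
      have hd0 : 0 < d := by omega
      have he2 : 2 ≤ e := by nlinarith
      have hdo : d % 2 = 1 := by
        rcases Int.emod_two_eq d with h | h
        · exfalso
          obtain ⟨k, hk⟩ : (2:Int) ∣ d := Int.dvd_of_emod_eq_zero h
          have : m = 2 * (k * e) := by rw [he, hk]; ring
          omega
        · exact h
      have heo : e % 2 = 1 := by
        rcases Int.emod_two_eq e with h | h
        · exfalso
          obtain ⟨k, hk⟩ : (2:Int) ∣ e := Int.dvd_of_emod_eq_zero h
          have : m = 2 * (d * k) := by rw [he, hk]; ring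
          omega
        · exact h
      rcases le_or_gt d e with hde | hde
      · exact ⟨d, e, by omega, hde, hdo, heo, he⟩
      · exact ⟨e, d, by omega, by omega, heo, hdo, by rw [he]; ring⟩
    · rintro ⟨a, b, ha3, hab, ha2, hb2, hm⟩
      have hm9 : 9 ≤ m := by nlinarith
      set N := m.toNat with hN
      have hNm : (N : Int) = m := Int.toNat_of_nonneg (by omega)
      have hbdvd : b ∣ m := ⟨a, by rw [hm]; ring⟩
      have hbm : b < m := by nlinarith
      have hbN : (b.toNat : Int) = b := Int.toNat_of_nonneg (by omega)
      have hbNd : b.toNat ∣ N := by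
        rw [← Int.natCast_dvd_natCast, hbN, hNm]
        exact hbdvd
      have hNP : ¬ N.Prime := by
        intro hp
        rcases (Nat.Prime.eq_one_or_self_of_dvd hp _ hbNd) with h | h <;> omega
      have hpp : (N.minFac).Prime := Nat.minFac_prime (by omega)
      have hpd : N.minFac ∣ N := Nat.minFac_dvd N
      have hsq : N.minFac ^ 2 ≤ N := Nat.minFac_sq_le_self (by omega) hNP
      set p := N.minFac with hp
      have hp2 : p ≠ 2 := by
        intro hp2
        obtain ⟨k, hk⟩ : (2 : Int) ∣ m := by
          rw [← hNm]
          exact_mod_cast hp2 ▸ hpd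
        omega
      have hp3 : p ≠ 3 := by
        intro hp3
        obtain ⟨k, hk⟩ : (3 : Int) ∣ m := by
          rw [← hNm]
          exact_mod_cast hp3 ▸ hpd
        omega
      have hp5 : 5 ≤ p := by
        have h2le := hpp.two_le
        have h4 : p ≠ 4 := by
          intro h4
          exact absurd (h4 ▸ hpp) (by decide)
        omega
      have hpo : p % 2 = 1 := by
        rcases Nat.even_or_odd p with h | h
        · obtain ⟨k, hk⟩ := h
          have : 2 ∣ p := ⟨k, by omega⟩
          rcases hpp.eq_one_or_self_of_dvd 2 this with h' | h' <;> omega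
        · exact Nat.odd_iff.mp h
      have hpn3 : p % 3 ≠ 0 := by
        intro h
        have : 3 ∣ p := Nat.dvd_of_mod_eq_zero h
        rcases hpp.eq_one_or_self_of_dvd 3 this with h' | h' <;> omega
      have hDdvd : (p : Int) ∣ m := by
        rw [← hNm]
        exact_mod_cast hpd
      have hDD : (p : Int) * (p : Int) ≤ m := by
        rw [← hNm]
        calc ((p : Int)) * p = ((p ^ 2 : Nat) : Int) := by push_cast; ring
        _ ≤ (N : Int) := by exact_mod_cast hsq
      have hp6 : (p : Int) % 6 = 1 ∨ (p : Int) % 6 = 5 := by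
        have : (p : Int) % 6 = ((p % 6 : Nat) : Int) := by push_cast; omega
        omega
      apply pvWheel_complete m (p : Int) hDdvd hDD hp6 (m.toNat + 1) 5 (by norm_num)
        (by norm_num) (by exact_mod_cast hp5)
      have hpm : (p : Int) ≤ m := by nlinarith
      push_cast
      omega

-- the odd numbers 2c+1, 2(c+1)+1, … (fuel many)
def pvNums (c : Int) : Nat → List Int
  | 0 => []
  | f + 1 => (c * 2 + 1) :: pvNums (c + 1) f

lemma pvNums_append (c : Int) (p q : Nat) :
    pvNums c (p + q) = pvNums c p ++ pvNums (c + p) q := by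
  induction p generalizing c with
  | zero => simp [pvNums]
  | succ p ih =>
      have : p + 1 + q = (p + q) + 1 := by omega
      rw [this]
      simp only [pvNums, ih (c + 1)]
      have : c + 1 + (p : Int) = c + ((p : Nat) + 1 : Nat) := by push_cast; ring
      rw [this, List.cons_append]

lemma mem_pvNums (c : Int) (f : Nat) (m : Int) :
    m ∈ pvNums c f ↔ m % 2 = 1 ∧ c * 2 + 1 ≤ m ∧ m ≤ (c + f) * 2 - 1 := by
  induction f generalizing c with
  | zero => simp [pvNums]; omega
  | succ f ih =>
      simp only [pvNums, List.mem_cons, ih (c + 1)]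
      push_cast
      constructor
      · rintro (rfl | ⟨h1, h2, h3⟩) <;> constructor <;> omega
      · rintro ⟨h1, h2, h3⟩
        by_cases hm : m = c * 2 + 1
        · exact Or.inl hm
        · right; refine ⟨h1, by omega, by omega⟩

lemma pairwise_pvNums (c : Int) (f : Nat) : (pvNums c f).Pairwise (· < ·) := by
  induction f generalizing c with
  | zero => simp [pvNums]
  | succ f ih =>
      refine List.Pairwise.cons ?_ (ih (c + 1))
      intro x hx
      rw [mem_pvNums] at hx
      omega

lemma pvLoopA_eq (fuel : Nat) (n : Int) (acc : List Int) (c : Int)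
    (hlen : n - acc.length ≤ (((pvNums c fuel).filter pvIsOddComposite).length : Int)) :
    pvLoopA n fuel acc c =
      acc ++ ((pvNums c fuel).filter pvIsOddComposite).take (n - acc.length).toNat := by
  induction fuel generalizing acc c with
  | zero =>
      simp only [pvNums, List.filter_nil, List.length_nil] at hlen ⊢
      have : (n - acc.length).toNat = 0 := by omega
      simp [pvLoopA, this]
  | succ f ih =>
      rw [pvLoopA]
      by_cases hc : (acc.length : Int) < n
      · simp only [hc, if_true]
        simp only [pvNums, List.filter_cons] at hlen ⊢
        by_cases hoc : pvIsOddComposite (c * 2 + 1)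
        · simp only [hoc, if_true, decide_true] at hlen ⊢
          rw [ih (acc ++ [c * 2 + 1]) (c + 1) (by simp at hlen ⊢; omega)]
          have ht : (n - acc.length).toNat = ((n - (acc ++ [c * 2 + 1]).length).toNat) + 1 := by
            simp; omega
          rw [ht, List.take_succ_cons, List.append_assoc, List.singleton_append]
        · simp only [hoc, if_false, decide_false] at hlen ⊢
          exact ih acc (c + 1) hlen
      · simp only [hc, if_false]
        have : (n - acc.length).toNat = 0 := by omega
        simp [this]

-- the witnesses 9, 15, …, 6n+3 : n distinct odd composites ≤ 6n+3
def pvWits (n : Nat) : List Int := (List.range n).map (fun t => ((6 * t + 9 : Nat) : Int))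

lemma pvWits_mem (n : Nat) (x : Int) (hx : x ∈ pvWits n) :
    x ∈ (pvNums 2 (3 * n)).filter pvIsOddComposite := by
  simp only [pvWits, List.mem_map, List.mem_range] at hx
  obtain ⟨t, ht, rfl⟩ := hx
  rw [List.mem_filter]
  constructor
  · rw [mem_pvNums]
    push_cast
    omega
  · rw [pvIsOddComposite_iff]
    exact ⟨3, 2 * t + 3, by norm_num, by push_cast; omega, by norm_num, by push_cast; omega,
      by push_cast; ring⟩

lemma pvWits_length_le (n : Nat) :
    (n : Int) ≤ (((pvNums 2 (3 * n)).filter pvIsOddComposite).length : Int) := by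
  have hnd : (pvWits n).Nodup := by
    unfold pvWits
    refine List.Nodup.map ?_ List.nodup_range
    intro a b hab
    simp only [Nat.cast_inj] at hab
    omega
  have hsub : pvWits n ⊆ (pvNums 2 (3 * n)).filter pvIsOddComposite :=
    fun x hx => pvWits_mem n x hx
  have h1 : (pvWits n).toFinset.card ≤
      ((pvNums 2 (3 * n)).filter pvIsOddComposite).toFinset.card :=
    Finset.card_le_card (fun x hx => List.mem_toFinset.mpr (hsub (List.mem_toFinset.mp hx)))
  have h2 : (pvWits n).toFinset.card = n := by
    rw [List.toFinset_card_of_nodup hnd]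
    simp [pvWits]
  have h3 := List.toFinset_card_le ((pvNums 2 (3 * n)).filter pvIsOddComposite)
  omega

-- the ascending list of all odd composites ≤ 6n+3
lemma mem_canon (n : Nat) (m : Int) :
    m ∈ (pvNums 2 (3 * n)).filter pvIsOddComposite ↔ pvIsOC m ∧ m ≤ 6 * n + 3 := by
  rw [List.mem_filter, mem_pvNums, pvIsOddComposite_iff]
  constructor
  · rintro ⟨⟨h1, h2, h3⟩, hoc⟩
    refine ⟨hoc, by push_cast at h3 ⊢; omega⟩
  · rintro ⟨hoc, hle⟩
    have := pvIsOC_odd_ge m hoc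
    exact ⟨⟨this.1, by omega, by push_cast at hle ⊢; omega⟩, hoc⟩

lemma pv_mem_fold_update (l : List Int) (g : Int → List Int) (s : PySem.Set Int) (y : Int) :
    y ∈ l.foldl (fun s a => PySem.Set.update s (g a)) s ↔ y ∈ s ∨ ∃ a ∈ l, y ∈ g a := by
  induction l generalizing s with
  | nil => simp
  | cons a l ih =>
      simp only [List.foldl_cons, ih, PySem.Set.mem_update, List.mem_cons]
      constructor
      · rintro ((h | h) | ⟨a', ha', h⟩)
        · exact Or.inl h
        · exact Or.inr ⟨a, Or.inl rfl, h⟩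
        · exact Or.inr ⟨a', Or.inr ha', h⟩
      · rintro (h | ⟨a', (rfl | ha'), h⟩)
        · exact Or.inl (Or.inl h)
        · exact Or.inl (Or.inr h)
        · exact Or.inr ⟨a', ha', h⟩

lemma mem_comps (n : Int) (m : Int) :
    (m ∈ (PySem.List.pyRange 3 (PySem.Int.floordiv (6 * n + 3) 3 + 1) 2).foldl
        (fun s a => PySem.Set.update s (PySem.List.pyRange (a * a) (6 * n + 3 + 1) (2 * a)))
        PySem.Set.empty) ↔ pvIsOC m ∧ m ≤ 6 * n + 3 := by
  rw [pv_mem_fold_update]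
  have h2 : (0 : Int) < 2 := by norm_num
  simp only [PySem.Set.empty, List.not_mem_nil, false_or,
    PySem.List.mem_pyRange_iff_of_pos h2]
  constructor
  · rintro ⟨a, ⟨ha3, halt, ⟨j, hj⟩⟩, hy⟩
    rw [PySem.List.mem_pyRange_iff_of_pos (by omega : (0:Int) < 2 * a)] at hy
    obtain ⟨⟨haa, hlt, k, hk⟩⟩ := And.intro hy trivial
    have hk0 : 0 ≤ k := by nlinarith
    refine ⟨⟨a, a + 2 * k, by omega, by omega, by omega, by omega,
      by linear_combination hk⟩, by omega⟩
  · rintro ⟨⟨a, b, ha3, hab, ha2, hb2, rfl⟩, hle⟩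
    have ha : a * 3 ≤ 6 * n + 3 := by nlinarith
    obtain ⟨k, hk2⟩ : ∃ k : Int, b = a + 2 * k := ⟨(b - a) / 2, by omega⟩
    refine ⟨a, ⟨ha3, ?_, ⟨(a - 3) / 2, by omega⟩⟩, ?_⟩
    · have := (PySem.Int.le_floordiv_iff_mul_le (by norm_num : (0:Int) < 3)
        (a := 6 * n + 3) (q := a)).mpr ha
      omega
    · rw [PySem.List.mem_pyRange_iff_of_pos (by omega : (0:Int) < 2 * a)]
      refine ⟨by nlinarith, by omega, ⟨k, by linear_combination a * hk2⟩⟩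

lemma nodup_comps (n : Int) :
    ((PySem.List.pyRange 3 (PySem.Int.floordiv (6 * n + 3) 3 + 1) 2).foldl
        (fun s a => PySem.Set.update s (PySem.List.pyRange (a * a) (6 * n + 3 + 1) (2 * a)))
        PySem.Set.empty).Nodup := by
  have : ∀ (l : List Int) (s : PySem.Set Int), s.Nodup →
      (l.foldl (fun s a =>
        PySem.Set.update s (PySem.List.pyRange (a * a) (6 * n + 3 + 1) (2 * a))) s).Nodup := by
    intro l
    induction l with
    | nil => exact fun s h => h
    | cons a l ih =>
        intro s h
        simp only [List.foldl_cons]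
        exact ih _ (PySem.Set.nodup_update _ _ h)
  exact this _ _ (List.nodup_nil)

-- ===== VERDICT (by name: the statement is the Claim_ definition above) =====
theorem createOddCompositeList_spec : Claim_equal_createOddCompositeList := by
  intro n _
  unfold Spec_createOddCompositeList createOddCompositeList createOddCompositeList_alt
  by_cases hn : n ≤ 0
  · simp only [if_pos hn]
    have h0 : 3 * n.toNat + 5 = 4 + 1 := by omega
    rw [h0, pvLoopA]
    simp only [List.length_nil, Nat.cast_zero]
    rw [if_neg (by omega)]
  · have hn' : 0 < n := by omega
    simp only [if_neg hn]
    set M := n.toNat with hM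
    have hMn : (M : Int) = n := Int.toNat_of_nonneg (by omega)
    have hsplit : pvNums 2 (3 * M + 5) = pvNums 2 (3 * M) ++ pvNums (2 + (3 * M : Nat)) 5 :=
      pvNums_append 2 (3 * M) 5
    set canon := (pvNums 2 (3 * M)).filter pvIsOddComposite with hcanon
    have hlenc : (n : Int) ≤ (canon.length : Int) := by
      rw [hcanon, ← hMn]; exact pvWits_length_le M
    have hfull : n - (([] : List Int).length : Int) ≤
        (((pvNums 2 (3 * M + 5)).filter pvIsOddComposite).length : Int) := by
      rw [hsplit, List.filter_append, List.length_append]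
      simp only [List.length_nil, Nat.cast_zero, sub_zero]
      rw [hcanon] at hlenc
      push_cast at hlenc ⊢
      omega
    rw [pvLoopA_eq (3 * M + 5) n [] 2 hfull]
    rw [List.nil_append]
    simp only [List.length_nil, Nat.cast_zero, sub_zero]
    rw [hsplit, List.filter_append]
    rw [List.take_append_of_le_length (by push_cast at hlenc; omega : n.toNat ≤ canon.length)]
    have hpair : canon.Pairwise (· < ·) := (pairwise_pvNums 2 (3 * M)).filter _
    have hnodupc : canon.Nodup := hpair.imp (fun h => ne_of_lt h)
    have hperm : canon.Perm
        ((PySem.List.pyRange 3 (PySem.Int.floordiv (6 * n + 3) 3 + 1) 2).foldl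
          (fun s a => PySem.Set.update s (PySem.List.pyRange (a * a) (6 * n + 3 + 1) (2 * a)))
          PySem.Set.empty) := by
      rw [List.perm_ext_iff_of_nodup hnodupc (nodup_comps n)]
      intro x
      rw [hcanon, mem_canon M x, mem_comps n x, hMn]
    rw [PySem.List.sorted_eq_of_perm_of_pairwise_lt _ canon (fun x => x) hperm hpair]
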